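-- pv_equiv track=rewrite | github.com/jcrattz/data_cube_utilities_sandbox | plotter_utils.py | remove_non_unique_ordered_list_str
-- ===== SOURCE A (Python) =====
-- def remove_non_unique_ordered_list_str(ordered_list):
--     """
--     Sets all occurrences of a value in an ordered list after its first occurence to ''.
--     For example, ['a', 'a', 'b', 'b', 'c'] would become ['a', '', 'b', '', 'c'].
--     """
--     prev_unique_str = ""
--     for i in range(len(ordered_list)):
--         current_str = ordered_list[i]
--         if current_str != prev_unique_str:
--             prev_unique_str = current_str
--         else:
--             ordered_list[i] = ""
--     return ordered_list
-- ===== SOURCE B (Python) =====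
-- def remove_non_unique_ordered_list_str(ordered_list):
--     """
--     Sets all occurrences of a value in an ordered list after its first occurence to ''.
--     Run-based rewrite: scan maximal runs of consecutive equal elements, keep the
--     first element of each run and emit '' for the rest, then write back in place.
--     """
--     result = []
--     i, n = 0, len(ordered_list)
--     while i < n:
--         key = ordered_list[i]
--         j = i + 1
--         while j < n and ordered_list[j] == key:
--             j += 1
--         result.append(key)
--         result.extend([""] * (j - i - 1))
--         i = j
--     ordered_list[:] = result
--     return ordered_list
-- ===== Notes on version B (the rewrite author's own statement) =====
-- stated objective: alternative
-- what changed: Replaces the single pass with a 'previous unique' sentinel variable that blanks elements one by one via index assignment by a run-based scan: find each maximal run of consecutive equal elements, emit its key once followed by '' for the rest of the run, and write the result back with slice assignment (same in-place mutation, same return).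
import Mathlib
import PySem

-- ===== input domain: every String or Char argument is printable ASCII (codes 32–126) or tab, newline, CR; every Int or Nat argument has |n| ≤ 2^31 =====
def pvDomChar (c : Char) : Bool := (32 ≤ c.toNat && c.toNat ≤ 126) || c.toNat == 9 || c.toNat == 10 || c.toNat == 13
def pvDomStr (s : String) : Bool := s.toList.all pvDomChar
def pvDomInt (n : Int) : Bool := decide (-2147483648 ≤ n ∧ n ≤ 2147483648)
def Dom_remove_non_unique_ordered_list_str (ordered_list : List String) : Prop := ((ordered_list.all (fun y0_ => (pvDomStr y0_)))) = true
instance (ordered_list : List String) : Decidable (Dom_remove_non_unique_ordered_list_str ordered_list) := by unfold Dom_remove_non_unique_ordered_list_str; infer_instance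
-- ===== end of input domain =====

-- B replaces A's element-by-element sentinel pass by a run-based scan (keep each run's
-- first element, blank the rest); equal cost, different decomposition. Both A and B mutate
-- the Python list in place and return it; the theorems below are about the return value.

-- ===== PORT A =====
-- A: for i in range(len): read ordered_list[i]; update prev or set ordered_list[i] = "".
def remove_non_unique_ordered_list_str (ordered_list : List String) : List String :=
  (List.foldl
    (fun (st : List String × String) (i : Nat) =>
      match PySem.List.pyGet? st.1 (i : Int) with
      | none => st            -- unreachable: i < len(ordered_list)
      | some current_str =>
        if current_str ≠ st.2 then (st.1, current_str)
        else (st.1.set i "", st.2))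
    (ordered_list, "") (List.range ordered_list.length)).1

-- ===== PORT B =====
-- inner while loop of Source B: split off the maximal run equal to x
def spanEq (x : String) : List String → List String × List String
  | [] => ([], [])
  | y :: ys =>
    if y = x then
      let p := spanEq x ys
      (y :: p.1, p.2)
    else ([], y :: ys)

theorem spanEq_rest_length (x : String) (xs : List String) :
    (spanEq x xs).2.length ≤ xs.length := by
  induction xs with
  | nil => simp [spanEq]
  | cons y ys ih =>
    simp only [spanEq]
    split
    · exact Nat.le_succ_of_le ih
    · simp

def remove_non_unique_ordered_list_str_alt : List String → List String
  | [] => []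
  | x :: xs =>
    let p := spanEq x xs
    (x :: p.1.map (fun _ => "")) ++ remove_non_unique_ordered_list_str_alt p.2
termination_by l => l.length
decreasing_by
  simpa using Nat.lt_succ_of_le (spanEq_rest_length x xs)

-- ===== PRECONDITION & SPEC =====
def Spec_remove_non_unique_ordered_list_str (ordered_list : List String) (out : List String) : Prop := out = remove_non_unique_ordered_list_str_alt ordered_list
instance (ordered_list : List String) (out : List String) : Decidable (Spec_remove_non_unique_ordered_list_str ordered_list out) := by unfold Spec_remove_non_unique_ordered_list_str; infer_instance

-- ===== CLAIM (what is proved, stated in full; the proofs are below) =====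
def Claim_equal_remove_non_unique_ordered_list_str : Prop := ∀ (ordered_list : List String), Dom_remove_non_unique_ordered_list_str ordered_list → Spec_remove_non_unique_ordered_list_str ordered_list (remove_non_unique_ordered_list_str ordered_list)

-- ===== LEMMAS AND PROOFS =====

-- reference function: blank each element equal to its predecessor (prev = predecessor's value)
def fblank (prev : String) : List String → List String
  | [] => []
  | x :: xs => (if x = prev then "" else x) :: fblank x xs

theorem fblank_length (prev : String) (xs : List String) :
    (fblank prev xs).length = xs.length := by
  induction xs generalizing prev with
  | nil => rfl
  | cons x xs ih => simp [fblank, ih]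

theorem lastD_cons : ∀ (xs : List String) (x prev : String),
    (x :: xs).getLast?.getD prev = xs.getLast?.getD x
  | [], _, _ => by simp
  | y :: ys, x, prev => by
    rw [List.getLast?_cons_cons]
    obtain ⟨a, ha⟩ := Option.isSome_iff_exists.mp
      (List.getLast?_isSome.mpr (by simp : (y :: ys) ≠ []))
    simp [ha]

theorem fblank_append_singleton (prev : String) (xs : List String) (a : String) :
    fblank prev (xs ++ [a]) =
      fblank prev xs ++ [if a = xs.getLast?.getD prev then "" else a] := by
  induction xs generalizing prev with
  | nil => simp [fblank]
  | cons x xs ih =>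
    simp only [List.cons_append, fblank]
    rw [ih x, lastD_cons]

theorem fblank_const_prefix (x : String) (r rest : List String)
    (h : ∀ y ∈ r, y = x) :
    fblank x (r ++ rest) = r.map (fun _ => "") ++ fblank x rest := by
  induction r with
  | nil => rfl
  | cons y ys ih =>
    have hy : y = x := h y (by simp)
    subst hy
    simp only [List.cons_append, fblank, List.map_cons]
    rw [ih (fun z hz => h z (by simp [hz]))]
    simp

theorem spanEq_append (x : String) (xs : List String) :
    (spanEq x xs).1 ++ (spanEq x xs).2 = xs := by
  induction xs with
  | nil => rfl
  | cons y ys ih =>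
    simp only [spanEq]
    split
    · simpa using ih
    · rfl

theorem spanEq_run_eq (x : String) (xs : List String) :
    ∀ y ∈ (spanEq x xs).1, y = x := by
  induction xs with
  | nil => simp [spanEq]
  | cons z zs ih =>
    simp only [spanEq]
    split
    · intro y hy
      rcases List.mem_cons.mp hy with h | h
      · simpa [h] using ‹z = x›
      · exact ih y h
    · simp

theorem spanEq_rest_head (x : String) (xs : List String) (h t) :
    (spanEq x xs).2 = h :: t → h ≠ x := by
  induction xs with
  | nil => simp [spanEq]
  | cons z zs ih =>
    simp only [spanEq]
    split
    · exact ih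
    · intro he
      cases he
      assumption

-- B computes x :: fblank x xs on a nonempty list (induction on a length bound)
theorem alt_eq_fblank : ∀ (n : Nat) (x : String) (xs : List String), xs.length ≤ n →
    remove_non_unique_ordered_list_str_alt (x :: xs) = x :: fblank x xs := by
  intro n
  induction n with
  | zero =>
    intro x xs h
    have : xs = [] := List.eq_nil_of_length_eq_zero (Nat.le_zero.mp h)
    subst this
    simp [remove_non_unique_ordered_list_str_alt, spanEq, fblank]
  | succ n ih =>
    intro x xs h
    rw [remove_non_unique_ordered_list_str_alt]
    have hrun := spanEq_run_eq x xs
    have hfb : fblank x xs = (spanEq x xs).1.map (fun _ => "") ++ fblank x (spanEq x xs).2 := by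
      conv_lhs => rw [← spanEq_append x xs]
      exact fblank_const_prefix x _ _ hrun
    cases hrest : (spanEq x xs).2 with
    | nil =>
      rw [hfb, hrest]
      simp [remove_non_unique_ordered_list_str_alt, fblank]
    | cons hd tl =>
      have hlen : tl.length ≤ n := by
        have h1 := spanEq_rest_length x xs
        rw [hrest] at h1
        simp at h1
        omega
      have hne : hd ≠ x := spanEq_rest_head x xs hd tl hrest
      rw [hfb, hrest, ih hd tl hlen]
      simp [fblank, hne]

-- A's loop invariant: after k iterations the first k elements are blanked and
-- prev holds the original value of element k-1 (or "" at the start)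
theorem a_inv (l : List String) : ∀ k, k ≤ l.length →
    List.foldl
      (fun (st : List String × String) (i : Nat) =>
        match PySem.List.pyGet? st.1 (i : Int) with
        | none => st
        | some current_str =>
          if current_str ≠ st.2 then (st.1, current_str)
          else (st.1.set i "", st.2))
      (l, "") (List.range k)
      = (fblank "" (l.take k) ++ l.drop k, (l.take k).getLast?.getD "") := by
  intro k
  induction k with
  | zero => simp [fblank]
  | succ k ih =>
    intro hk
    have hk' : k ≤ l.length := Nat.le_of_succ_le hk
    have hklt : k < l.length := hk
    rw [List.range_succ, List.foldl_append, ih hk']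
    have hflen : (fblank "" (l.take k)).length = k := by
      rw [fblank_length, List.length_take]
      omega
    have hdrop : l.drop k = l[k] :: l.drop (k + 1) := List.drop_eq_getElem_cons hklt
    have htake : l.take (k + 1) = l.take k ++ [l[k]] := by
      rw [List.take_add_one, List.getElem?_eq_getElem hklt]
      rfl
    have hget : PySem.List.pyGet? (fblank "" (l.take k) ++ l.drop k) (k : Int)
        = some l[k] := by
      rw [PySem.List.pyGet?_natCast,
        List.getElem?_append_right (Nat.le_of_eq hflen),
        hflen, Nat.sub_self, List.getElem?_drop]
      simp [List.getElem?_eq_getElem hklt]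
    simp only [List.foldl_cons, List.foldl_nil, hget]
    by_cases hcase : l[k] = (l.take k).getLast?.getD ""
    · -- equal to prev: element k is set to ""
      rw [if_neg (not_not_intro hcase)]
      have hset : (fblank "" (l.take k) ++ l.drop k).set k ""
          = fblank "" (l.take k) ++ ("" :: l.drop (k + 1)) := by
        rw [List.set_append_right _ _ (Nat.le_of_eq hflen), hflen, Nat.sub_self, hdrop]
        rfl
      rw [hset, htake, fblank_append_singleton, if_pos hcase]
      simp only [Prod.mk.injEq]
      constructor
      · simp
      · rw [List.getLast?_concat]
        simpa using hcase.symm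
    · -- different from prev: prev becomes l[k]
      rw [if_pos hcase]
      simp only [Prod.mk.injEq]
      constructor
      · rw [htake, fblank_append_singleton, if_neg hcase, hdrop]
        simp
      · rw [htake, List.getLast?_concat]
        rfl

theorem a_eq_fblank (l : List String) :
    remove_non_unique_ordered_list_str l = fblank "" l := by
  unfold remove_non_unique_ordered_list_str
  rw [a_inv l l.length (Nat.le_refl _)]
  simp

-- ===== VERDICT (by name: the statement is the Claim_ definition above) =====
theorem remove_non_unique_ordered_list_str_spec : Claim_equal_remove_non_unique_ordered_list_str := by
  intro l _
  unfold Spec_remove_non_unique_ordered_list_str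
  rw [a_eq_fblank]
  cases l with
  | nil => rw [remove_non_unique_ordered_list_str_alt]; rfl
  | cons x xs =>
    rw [alt_eq_fblank xs.length x xs (Nat.le_refl _)]
    show (if x = "" then "" else x) :: fblank x xs = x :: fblank x xs
    split_ifs with h
    · rw [h]
    · rfl
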